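-- pv_equiv track=rewrite | github.com/pipilu89/AmpyFin | temp.py | summarize_by_indicator
-- ===== SOURCE A (Python) =====
-- def summarize_by_indicator(action_talib_dict):
--     summary = {}
--     for indicators in action_talib_dict.values():
--         for indicator, action in indicators.items():
--             if indicator not in summary:
--                 summary[indicator] = {'Buy': 0, 'Sell': 0, 'Hold': 0}
--             if action in summary[indicator]:
--                 summary[indicator][action] += 1
--     return summary
-- ===== SOURCE B (Python) =====
-- def summarize_by_indicator(action_talib_dict):
--     grouped = {}
--     for indicators in action_talib_dict.values():
--         for indicator, action in indicators.items():
--             grouped.setdefault(indicator, []).append(action)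
--     return {indicator: {'Buy': actions.count('Buy'),
--                         'Sell': actions.count('Sell'),
--                         'Hold': actions.count('Hold')}
--             for indicator, actions in grouped.items()}
-- ===== Notes on version B (the rewrite author's own statement) =====
-- stated objective: alternative
-- what changed: Instead of maintaining per-indicator counter dicts updated in place while iterating, B first groups all actions into per-indicator lists (first-appearance order) and then builds each summary entry in a second pass with list.count for the three tracked labels.
import Mathlib
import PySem

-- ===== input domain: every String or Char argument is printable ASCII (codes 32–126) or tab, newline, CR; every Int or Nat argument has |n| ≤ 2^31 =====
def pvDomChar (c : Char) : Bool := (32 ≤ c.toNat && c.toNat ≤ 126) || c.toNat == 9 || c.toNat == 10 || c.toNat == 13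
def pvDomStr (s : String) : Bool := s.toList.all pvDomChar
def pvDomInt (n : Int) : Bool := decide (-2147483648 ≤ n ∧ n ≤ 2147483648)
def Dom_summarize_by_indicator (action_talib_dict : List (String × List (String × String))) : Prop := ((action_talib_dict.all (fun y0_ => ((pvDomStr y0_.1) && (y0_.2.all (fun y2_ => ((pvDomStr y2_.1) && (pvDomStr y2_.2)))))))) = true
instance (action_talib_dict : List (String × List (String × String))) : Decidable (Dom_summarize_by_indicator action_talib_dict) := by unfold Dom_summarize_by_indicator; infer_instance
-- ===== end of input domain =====

-- B groups the actions into per-indicator lists in one pass and then counts the three tracked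
-- labels per list in a second pass, instead of A's in-place counter updates; same cost, different decomposition.

-- ===== PORT A =====
-- {'Buy': 0, 'Sell': 0, 'Hold': 0}
def pvDefaultCounts : PySem.Dict String Int :=
  PySem.Dict.ofList [("Buy", 0), ("Sell", 0), ("Hold", 0)]

-- body of A's inner loop over one (indicator, action) item
def pvStepA (summary : PySem.Dict String (PySem.Dict String Int)) (p : String × String) :
    PySem.Dict String (PySem.Dict String Int) :=
  let summary := if !summary.contains p.1 then summary.insert p.1 pvDefaultCounts else summary
  if (summary.getD p.1 PySem.Dict.empty).contains p.2 then
    summary.modify p.1 PySem.Dict.empty (fun inner => inner.modify p.2 0 (· + 1))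
  else summary

def summarize_by_indicator (action_talib_dict : List (String × List (String × String))) : List (String × List (String × Int)) :=
  (action_talib_dict.foldl
    (fun summary kv => kv.2.foldl pvStepA summary) PySem.Dict.empty).items.map
      (fun q => (q.1, q.2.items))

-- ===== PORT B =====
-- body of B's first pass: grouped.setdefault(indicator, []).append(action)
def pvStepB (g : PySem.Dict String (List String)) (p : String × String) :
    PySem.Dict String (List String) :=
  g.modify p.1 [] (· ++ [p.2])

def summarize_by_indicator_alt (action_talib_dict : List (String × List (String × String))) : List (String × List (String × Int)) :=
  (action_talib_dict.foldl
    (fun g kv => kv.2.foldl pvStepB g) PySem.Dict.empty).items.map (fun q =>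
    (q.1, [("Buy", (q.2.count "Buy" : Int)),
           ("Sell", (q.2.count "Sell" : Int)),
           ("Hold", (q.2.count "Hold" : Int))]))

-- ===== PRECONDITION & SPEC =====
def Spec_summarize_by_indicator (action_talib_dict : List (String × List (String × String))) (out : List (String × List (String × Int))) : Prop := out = summarize_by_indicator_alt action_talib_dict
instance (action_talib_dict : List (String × List (String × String))) (out : List (String × List (String × Int))) : Decidable (Spec_summarize_by_indicator action_talib_dict out) := by unfold Spec_summarize_by_indicator; infer_instance

-- ===== CLAIM (what is proved, stated in full; the proofs are below) =====
def Claim_equal_summarize_by_indicator : Prop := ∀ (action_talib_dict : List (String × List (String × String))), Dom_summarize_by_indicator action_talib_dict → Spec_summarize_by_indicator action_talib_dict (summarize_by_indicator action_talib_dict)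

-- ===== LEMMAS AND PROOFS =====

-- the counter dict A keeps for an indicator whose seen actions are `acts`
def pvCounts (acts : List String) : PySem.Dict String Int :=
  PySem.Dict.mk [("Buy", acts.count "Buy"), ("Sell", acts.count "Sell"), ("Hold", acts.count "Hold")]

-- B's grouping dict viewed as A's summary dict
def pvRender (g : PySem.Dict String (List String)) : PySem.Dict String (PySem.Dict String Int) :=
  PySem.Dict.mk (g.items.map (fun q => (q.1, pvCounts q.2)))

theorem pvRender_contains (g : PySem.Dict String (List String)) (k : String) :
    (pvRender g).contains k = g.contains k := by
  simp [pvRender, PySem.Dict.contains, List.any_map, Function.comp_def]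

theorem pvRender_keys (g : PySem.Dict String (List String)) :
    (pvRender g).keys = g.keys := by
  simp [pvRender, PySem.Dict.keys, List.map_map, Function.comp_def]

theorem pvRender_get? (g : PySem.Dict String (List String)) (k : String) :
    (pvRender g).get? k = (g.get? k).map pvCounts := by
  simp [pvRender, PySem.Dict.get?, List.find?_map, Function.comp_def, Option.map_map]

theorem pvRender_insert (g : PySem.Dict String (List String)) (k : String) (v : List String) :
    pvRender (g.insert k v) = (pvRender g).insert k (pvCounts v) := by
  apply PySem.Dict.ext
  by_cases h : g.contains k = true
  · have h2 : (pvRender g).contains k = true := by rw [pvRender_contains]; exact h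
    show List.map (fun q => (q.1, pvCounts q.2)) (g.insert k v).items = _
    rw [PySem.Dict.items_insert_of_contains _ _ h, PySem.Dict.items_insert_of_contains _ _ h2]
    show _ = List.map _ (List.map (fun q => (q.1, pvCounts q.2)) g.items)
    rw [List.map_map, List.map_map]
    refine List.map_congr_left (fun q _ => ?_)
    by_cases hq : q.1 = k <;> simp [hq]
  · have h' : g.contains k = false := by simpa using h
    have h2 : (pvRender g).contains k = false := by rw [pvRender_contains]; exact h'
    show List.map (fun q => (q.1, pvCounts q.2)) (g.insert k v).items = _
    rw [PySem.Dict.items_insert_of_not_contains _ _ h', PySem.Dict.items_insert_of_not_contains _ _ h2]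
    simp [pvRender]

theorem pvInsert_self_of_get? {κ ν : Type} [BEq κ] [LawfulBEq κ]
    (d : PySem.Dict κ ν) (k : κ) (v : ν) (h : d.get? k = some v) (hn : d.keys.Nodup) :
    d.insert k v = d := by
  have hc : d.contains k = true := by
    rw [PySem.Dict.contains_eq_isSome_get?, h]; rfl
  apply PySem.Dict.ext
  rw [PySem.Dict.items_insert_of_contains _ _ hc]
  have hq : ∀ q ∈ d.items, (if (q.1 == k) = true then (k, v) else q) = id q := by
    intro q hqm
    by_cases hk : (q.1 == k) = true
    · have hk' : q.1 = k := by simpa using hk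
      have := PySem.Dict.get?_of_mem_items d (k := q.1) (v := q.2) hqm hn
      rw [hk', h] at this
      simp [hk'.symm, (Option.some_inj.mp this)]
    · simp [hk]
  rw [List.map_congr_left hq, List.map_id]

theorem pvCounts_contains (acts : List String) (a : String) :
    (pvCounts acts).contains a = ("Buy" == a || "Sell" == a || "Hold" == a) := by
  simp [pvCounts, PySem.Dict.contains, Bool.or_assoc]

theorem pvCounts_append_untracked (acts : List String) (a : String)
    (h1 : a ≠ "Buy") (h2 : a ≠ "Sell") (h3 : a ≠ "Hold") :
    pvCounts (acts ++ [a]) = pvCounts acts := by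
  simp [pvCounts, List.count_append, h1, h2, h3]

theorem pvCounts_modify_tracked (acts : List String) (a : String)
    (h : a = "Buy" ∨ a = "Sell" ∨ a = "Hold") :
    (pvCounts acts).modify a 0 (· + 1) = pvCounts (acts ++ [a]) := by
  rcases h with h | h | h <;> subst h <;>
    simp [pvCounts, PySem.Dict.modify, PySem.Dict.insert, PySem.Dict.contains,
      PySem.Dict.getD, PySem.Dict.get?, List.count_append]

theorem pvStep_comm (g : PySem.Dict String (List String)) (hn : g.keys.Nodup)
    (p : String × String) : pvStepA (pvRender g) p = pvRender (pvStepB g p) := by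
  unfold pvStepA pvStepB
  by_cases h : g.contains p.1 = true
  · obtain ⟨acts, hacts⟩ : ∃ acts, g.get? p.1 = some acts := by
      cases hge : g.get? p.1 with
      | none => rw [PySem.Dict.get?_eq_none_iff_contains] at hge; rw [h] at hge; cases hge
      | some a => exact ⟨a, rfl⟩
    have hc : (pvRender g).contains p.1 = true := by rw [pvRender_contains]; exact h
    have hgd : (pvRender g).getD p.1 PySem.Dict.empty = pvCounts acts := by
      rw [PySem.Dict.getD_eq_get?_getD, pvRender_get?, hacts]; rfl
    have hB : g.modify p.1 [] (· ++ [p.2]) = g.insert p.1 (acts ++ [p.2]) := by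
      rw [PySem.Dict.modify, PySem.Dict.getD_eq_get?_getD, hacts, Option.getD_some]
    simp only [hc, Bool.not_true, if_neg (by simp : ¬((false : Bool) = true)), hgd, hB]
    by_cases ht : ((("Buy" : String) == p.2) || ("Sell" == p.2) || ("Hold" == p.2)) = true
    · rw [if_pos (by rw [pvCounts_contains]; exact ht)]
      rw [PySem.Dict.modify, hgd, pvRender_insert]
      rw [pvCounts_modify_tracked acts p.2 (by
        simp only [Bool.or_eq_true, beq_iff_eq] at ht
        rcases ht with (hh | hh) | hh
        exacts [Or.inl hh.symm, Or.inr (Or.inl hh.symm), Or.inr (Or.inr hh.symm)])]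
    · rw [if_neg (by rw [pvCounts_contains]; exact ht)]
      simp only [Bool.or_eq_true, beq_iff_eq] at ht
      push_neg at ht
      obtain ⟨⟨n1, n2⟩, n3⟩ := ht
      rw [pvRender_insert, pvCounts_append_untracked acts p.2 (fun e => n1 e.symm) (fun e => n2 e.symm) (fun e => n3 e.symm)]
      exact (pvInsert_self_of_get? _ _ _ (by rw [pvRender_get?, hacts]; rfl)
        (by rw [pvRender_keys]; exact hn)).symm
  · have h' : g.contains p.1 = false := by simpa using h
    have hc : (pvRender g).contains p.1 = false := by rw [pvRender_contains]; exact h'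
    have hB : g.modify p.1 [] (· ++ [p.2]) = g.insert p.1 [p.2] := by
      rw [PySem.Dict.modify, PySem.Dict.getD_of_not_contains _ _ h']; rfl
    have hgd : (((pvRender g).insert p.1 pvDefaultCounts).getD p.1 PySem.Dict.empty) = pvCounts [] := by
      rw [PySem.Dict.getD_eq_get?_getD, PySem.Dict.get?_insert_self]; rfl
    simp only [hc, Bool.not_false, if_true, hgd, hB]
    by_cases ht : ((("Buy" : String) == p.2) || ("Sell" == p.2) || ("Hold" == p.2)) = true
    · rw [if_pos (by rw [pvCounts_contains]; exact ht)]
      rw [PySem.Dict.modify, hgd, PySem.Dict.insert_insert_self, pvRender_insert]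
      rw [pvCounts_modify_tracked [] p.2 (by
        simp only [Bool.or_eq_true, beq_iff_eq] at ht
        rcases ht with (hh | hh) | hh
        exacts [Or.inl hh.symm, Or.inr (Or.inl hh.symm), Or.inr (Or.inr hh.symm)])]
      rfl
    · rw [if_neg (by rw [pvCounts_contains]; exact ht)]
      simp only [Bool.or_eq_true, beq_iff_eq] at ht
      push_neg at ht
      obtain ⟨⟨n1, n2⟩, n3⟩ := ht
      rw [pvRender_insert]
      have : pvCounts [p.2] = pvCounts [] := pvCounts_append_untracked [] p.2 (fun e => n1 e.symm) (fun e => n2 e.symm) (fun e => n3 e.symm)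
      rw [this]
      rfl

theorem pvNodup_stepB (g : PySem.Dict String (List String)) (hn : g.keys.Nodup)
    (p : String × String) : (pvStepB g p).keys.Nodup := by
  simpa [pvStepB] using
    PySem.Dict.nodup_keys_foldl_modify_key [p] Prod.fst []
      (fun _ x v => v ++ [x.2]) g hn

theorem pvFold_comm (l : List (String × String)) (g : PySem.Dict String (List String))
    (hn : g.keys.Nodup) :
    l.foldl pvStepA (pvRender g) = pvRender (l.foldl pvStepB g) := by
  induction l generalizing g with
  | nil => rfl
  | cons p l ih =>
    rw [List.foldl_cons, List.foldl_cons, pvStep_comm g hn p]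
    exact ih _ (pvNodup_stepB g hn p)

-- ===== VERDICT (by name: the statement is the Claim_ definition above) =====
theorem summarize_by_indicator_spec : Claim_equal_summarize_by_indicator := by
  intro atd _
  unfold Spec_summarize_by_indicator summarize_by_indicator summarize_by_indicator_alt
  have hA : (List.foldl (fun summary kv => List.foldl pvStepA summary kv.2) PySem.Dict.empty atd)
      = (atd.flatMap (fun kv => kv.2)).foldl pvStepA PySem.Dict.empty := List.foldl_flatMap.symm
  have hB : (List.foldl (fun g kv => List.foldl pvStepB g kv.2) PySem.Dict.empty atd)
      = (atd.flatMap (fun kv => kv.2)).foldl pvStepB PySem.Dict.empty := List.foldl_flatMap.symm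
  rw [hA, hB]
  have h0 : (PySem.Dict.empty : PySem.Dict String (PySem.Dict String Int)) = pvRender PySem.Dict.empty := rfl
  rw [h0, pvFold_comm _ _ PySem.Dict.nodup_keys_empty]
  simp [pvRender, List.map_map, pvCounts, Function.comp_def, PySem.Dict.items]
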